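-- pv_equiv track=rewrite | github.com/Akards/Medusa | Medusa/sort/wikiBitonicSort.py | bitonic_merge
-- ===== SOURCE A (Python) =====
-- def bitonic_merge(up, x):
--     # Assume input x is bitonic, and sorted list is returned
--     if len(x) == 1:
--         return x
--     else:
--         bitonic_compare(up, x)
--         first = bitonic_merge(up, x[:len(x) // 2])
--         second = bitonic_merge(up, x[len(x) // 2:])
--         return first + second
--
-- def bitonic_compare(up, x):
--     dist = len(x) // 2
--     for i in range(dist):
--         if (x[i] > x[i + dist]) == up:
--             x[i], x[i + dist] = x[i + dist], x[i]  # Swap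
-- ===== SOURCE B (Python) =====
-- def bitonic_merge(up, x):
--     # Iterative explicit-stack version of the bitonic merge network;
--     # pure (does not mutate x, unlike A which swaps in place).
--     out = []
--     stack = [x]
--     while stack:
--         s = stack.pop()
--         if len(s) <= 1:
--             out.extend(s)
--             continue
--         d = len(s) // 2
--         pairs = [(b, a) if (a > b) == up else (a, b)
--                  for a, b in zip(s[:d], s[d:2 * d])]
--         stack.append([p[1] for p in pairs] + s[2 * d:])
--         stack.append([p[0] for p in pairs])
--     return out
-- ===== Notes on version B (the rewrite author's own statement) =====
-- stated objective: alternative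
-- what changed: A's top-down recursion with an in-place index-swapping compare pass is replaced by an iterative explicit-stack loop whose compare stage is a pure zip/pairwise pass producing the two halves directly (B also does not mutate the input list, while A swaps x in place).
import Mathlib
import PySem

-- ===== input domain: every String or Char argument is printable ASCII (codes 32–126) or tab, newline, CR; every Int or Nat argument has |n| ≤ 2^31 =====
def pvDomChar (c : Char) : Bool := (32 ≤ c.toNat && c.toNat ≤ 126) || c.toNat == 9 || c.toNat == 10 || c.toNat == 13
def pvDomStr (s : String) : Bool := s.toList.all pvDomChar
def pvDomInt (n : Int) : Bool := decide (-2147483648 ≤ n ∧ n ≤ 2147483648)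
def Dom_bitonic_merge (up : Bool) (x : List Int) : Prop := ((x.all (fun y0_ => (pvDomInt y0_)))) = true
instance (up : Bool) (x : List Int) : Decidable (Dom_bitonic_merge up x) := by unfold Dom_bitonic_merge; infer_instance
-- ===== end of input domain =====

-- B replaces A's recursion by an explicit-stack loop with a pure pairwise compare
-- stage (objective: alternative; B does not mutate its argument, while A's in-place
-- swaps on x are a caller-observable side effect — the equivalence proved here is
-- about the RETURN value only).

-- ===== PORT A =====
-- bitonic_compare mutates x in Python; modelled as a function returning the new list.
def swapStep (up : Bool) (dist : Nat) (acc : List Int) (i : Nat) : List Int :=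
  let a := acc.getD i 0
  let b := acc.getD (i + dist) 0
  if (decide (a > b)) == up then (acc.set i b).set (i + dist) a else acc

def bitonic_compare (up : Bool) (x : List Int) : List Int :=
  (List.range (x.length / 2)).foldl (swapStep up (x.length / 2)) x

-- length preservation, cited by bitonic_merge's decreasing_by
theorem swapStep_length (up : Bool) (dist : Nat) (acc : List Int) (i : Nat) :
    (swapStep up dist acc i).length = acc.length := by
  simp only [swapStep]; split <;> simp

theorem bitonic_compare_length (up : Bool) (x : List Int) :
    (bitonic_compare up x).length = x.length := by
  unfold bitonic_compare
  generalize (x.length / 2) = d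
  induction (List.range d) generalizing x with
  | nil => rfl
  | cons h t ih => simpa [List.foldl, swapStep_length] using ih (swapStep up d x h)

def bitonic_merge (up : Bool) (x : List Int) : List Int :=
  if x.length = 1 then x
  else if x.length = 0 then x  -- totality guard: Python A recurses forever on []; excluded by Pre_
  else
    bitonic_merge up ((bitonic_compare up x).take ((bitonic_compare up x).length / 2)) ++
      bitonic_merge up ((bitonic_compare up x).drop ((bitonic_compare up x).length / 2))
termination_by x.length
decreasing_by
  · simp [List.length_take, bitonic_compare_length]; omega
  · simp [List.length_drop, bitonic_compare_length]; omega

-- ===== PORT B =====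
def stage (up : Bool) (s : List Int) : List Int × List Int :=
  let d := s.length / 2
  let pairs := ((s.take d).zip ((s.drop d).take d)).map
    (fun p => if (decide (p.1 > p.2)) == up then (p.2, p.1) else p)
  (pairs.map Prod.fst, pairs.map Prod.snd ++ s.drop (2 * d))

-- length facts, cited by mergeLoop's decreasing_by
theorem stage_fst_length (up : Bool) (s : List Int) :
    (stage up s).1.length = s.length / 2 := by
  unfold stage; simp; omega

theorem stage_snd_length (up : Bool) (s : List Int) :
    (stage up s).2.length = s.length - s.length / 2 := by
  unfold stage; simp; omega

theorem pow3_split (n dd : Nat) (h1 : 1 ≤ dd) (h2 : dd < n) :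
    3 ^ dd + 3 ^ (n - dd) < 3 ^ n := by
  have ha : 3 ^ dd ≤ 3 ^ (n - 1) := Nat.pow_le_pow_right (by norm_num) (by omega)
  have hb : 3 ^ (n - dd) ≤ 3 ^ (n - 1) := Nat.pow_le_pow_right (by norm_num) (by omega)
  have hc : 3 ^ n = 3 ^ (n - 1) * 3 := by
    conv_lhs => rw [show n = (n - 1) + 1 by omega, Nat.pow_succ]
  have hp : 0 < 3 ^ (n - 1) := by positivity
  omega

def mergeLoop (up : Bool) : List (List Int) → List Int → List Int
  | [], out => out
  | s :: rest, out =>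
    if s.length ≤ 1 then mergeLoop up rest (out ++ s)
    else mergeLoop up ((stage up s).1 :: (stage up s).2 :: rest) out
termination_by stack _ => (stack.map (fun s => 3 ^ s.length)).sum
decreasing_by
  · have : 0 < 3 ^ s.length := by positivity
    simp only [List.map_cons, List.sum_cons]
    omega
  · simp only [List.map_cons, List.sum_cons, stage_fst_length, stage_snd_length]
    have := pow3_split s.length (s.length / 2) (by omega) (by omega)
    omega

def bitonic_merge_alt (up : Bool) (x : List Int) : List Int :=
  mergeLoop up [x] []

-- ===== PRECONDITION & SPEC =====
-- Pre_ excludes only the empty list, on which Python's A recurses without a base case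
-- and raises RecursionError.
def Pre_bitonic_merge (up : Bool) (x : List Int) : Prop := x ≠ []
instance (up : Bool) (x : List Int) : Decidable (Pre_bitonic_merge up x) := by
  unfold Pre_bitonic_merge; infer_instance

def pvWitness_bitonic_merge : Bool × List Int := (true, [2, 1])

def Spec_bitonic_merge (up : Bool) (x : List Int) (out : List Int) : Prop := out = bitonic_merge_alt up x
instance (up : Bool) (x : List Int) (out : List Int) : Decidable (Spec_bitonic_merge up x out) := by unfold Spec_bitonic_merge; infer_instance

-- ===== CLAIM (what is proved, stated in full; the proofs are below) =====
def Claim_equal_bitonic_merge : Prop := ∀ (up : Bool) (x : List Int), Dom_bitonic_merge up x → Pre_bitonic_merge up x → Spec_bitonic_merge up x (bitonic_merge up x)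

-- ===== LEMMAS AND PROOFS =====

-- value the compare stage leaves at position j < d (low side) / at position d+j (high side)
def loVal (up : Bool) (x : List Int) (d j : Nat) : Int :=
  if (decide (x.getD j 0 > x.getD (j + d) 0)) == up then x.getD (j + d) 0 else x.getD j 0

def hiVal (up : Bool) (x : List Int) (d j : Nat) : Int :=
  if (decide (x.getD j 0 > x.getD (j + d) 0)) == up then x.getD j 0 else x.getD (j + d) 0

theorem getD_set (l : List Int) (i j : Nat) (a : Int) :
    (l.set i a).getD j 0 = if i = j ∧ i < l.length then a else l.getD j 0 := by
  by_cases h : i = j ∧ i < l.length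
  · obtain ⟨rfl, hl⟩ := h
    simp [List.getD, hl]
  · simp only [List.getD]
    rcases Decidable.em (i = j) with rfl | hne
    · have hnl : ¬ i < l.length := by tauto
      simp [List.getElem?_set, hnl, h]
    · simp [List.getElem?_set_ne hne, h]

theorem foldl_swap_spec (up : Bool) (x : List Int) (d : Nat) (hd : 2 * d ≤ x.length) :
    ∀ k, k ≤ d →
      ((List.range k).foldl (swapStep up d) x).length = x.length ∧
      ∀ j, ((List.range k).foldl (swapStep up d) x).getD j 0 =
        if j < k then loVal up x d j
        else if d ≤ j ∧ j < d + k then hiVal up x d (j - d)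
        else x.getD j 0 := by
  intro k
  induction k with
  | zero =>
    intro _
    refine ⟨rfl, fun j => ?_⟩
    simp only [List.range_zero, List.foldl_nil]
    split_ifs with h1 h2 <;> first | rfl | omega
  | succ k ih =>
    intro hk
    obtain ⟨hlen, hget⟩ := ih (by omega)
    rw [List.range_succ, List.foldl_append, List.foldl_cons, List.foldl_nil]
    set y := (List.range k).foldl (swapStep up d) x with hy
    have hyk : y.getD k 0 = x.getD k 0 := by
      rw [hget k]; split_ifs with h1 h2 <;> first | rfl | omega
    have hykd : y.getD (k + d) 0 = x.getD (k + d) 0 := by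
      rw [hget (k + d)]; split_ifs with h1 h2 <;> first | rfl | omega
    unfold swapStep
    rw [hyk, hykd]
    by_cases hc : (decide (x.getD k 0 > x.getD (k + d) 0) == up) = true
    · rw [if_pos hc]
      refine ⟨by simp [hlen], fun j => ?_⟩
      rw [getD_set, List.length_set, hlen, getD_set, hlen, hget j]
      by_cases hj1 : j = k + d
      · rw [if_pos ⟨hj1.symm, by omega⟩, if_neg (by omega : ¬ j < k + 1),
          if_pos (by omega : d ≤ j ∧ j < d + (k + 1)), hj1, Nat.add_sub_cancel]
        unfold hiVal
        rw [if_pos hc]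
      · rw [if_neg (fun h => hj1 h.1.symm)]
        by_cases hj2 : j = k
        · rw [if_pos ⟨hj2.symm, by omega⟩, if_pos (by omega : j < k + 1), hj2]
          unfold loVal
          rw [if_pos hc]
        · rw [if_neg (fun h => hj2 h.1.symm)]
          split_ifs with h1 h2 h3 h4 h5 <;> first | rfl | omega
    · rw [if_neg hc]
      refine ⟨hlen, fun j => ?_⟩
      rw [hget j]
      by_cases hj1 : j = k
      · rw [if_neg (by omega : ¬ j < k), if_neg (by omega : ¬ (d ≤ j ∧ j < d + k)),
          if_pos (by omega : j < k + 1), hj1]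
        unfold loVal
        rw [if_neg hc]
      · by_cases hj2 : j = k + d
        · rw [if_neg (by omega : ¬ j < k), if_neg (by omega : ¬ (d ≤ j ∧ j < d + k)),
            if_neg (by omega : ¬ j < k + 1), if_pos (by omega : d ≤ j ∧ j < d + (k + 1)),
            hj2, Nat.add_sub_cancel]
          unfold hiVal
          rw [if_neg hc]
        · split_ifs with h1 h2 h3 h4 h5 <;> first | rfl | omega

theorem stage_fst_getD (up : Bool) (s : List Int) (j : Nat) (hj : j < s.length / 2) :
    (stage up s).1.getD j 0 = loVal up s (s.length / 2) j := by
  have hlenL : (stage up s).1.length = s.length / 2 := stage_fst_length up s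
  rw [List.getD_eq_getElem _ _ (by rw [hlenL]; exact hj)]
  simp only [stage, List.getElem_map, List.getElem_zip, List.getElem_take, List.getElem_drop]
  unfold loVal
  rw [List.getD_eq_getElem s 0 (by omega), List.getD_eq_getElem s 0 (by omega : j + s.length / 2 < s.length)]
  simp only [show s.length / 2 + j = j + s.length / 2 from by omega]
  split <;> rfl

theorem stage_snd_getD_lo (up : Bool) (s : List Int) (j : Nat) (hj : j < s.length / 2) :
    (stage up s).2.getD j 0 = hiVal up s (s.length / 2) j := by
  simp only [stage]
  rw [List.getD_append _ _ _ j (by simp; omega)]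
  rw [List.getD_eq_getElem _ _ (by simp; omega)]
  simp only [List.getElem_map, List.getElem_zip, List.getElem_take, List.getElem_drop]
  unfold hiVal
  rw [List.getD_eq_getElem s 0 (by omega), List.getD_eq_getElem s 0 (by omega : j + s.length / 2 < s.length)]
  simp only [show s.length / 2 + j = j + s.length / 2 from by omega]
  split <;> rfl

theorem stage_snd_getD_hi (up : Bool) (s : List Int) (j : Nat)
    (hj1 : s.length / 2 ≤ j) (hj2 : j < s.length - s.length / 2) :
    (stage up s).2.getD j 0 = s.getD (s.length / 2 + j) 0 := by
  simp only [stage]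
  rw [List.getD_append_right _ _ _ j (by simp; omega)]
  have hidx : j - ((((s.take (s.length / 2)).zip ((s.drop (s.length / 2)).take (s.length / 2))).map
      (fun p => if (decide (p.1 > p.2)) == up then (p.2, p.1) else p)).map Prod.snd).length
      = j - s.length / 2 := by simp; omega
  rw [hidx]
  rw [List.getD_eq_getElem _ _ (by simp; omega), List.getElem_drop,
    List.getD_eq_getElem s 0 (by omega)]
  simp only [show 2 * (s.length / 2) + (j - s.length / 2) = s.length / 2 + j from by omega]

theorem compare_eq_stage (up : Bool) (s : List Int) :
    bitonic_compare up s = (stage up s).1 ++ (stage up s).2 := by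
  have hd2 : 2 * (s.length / 2) ≤ s.length := by omega
  obtain ⟨hlen, hget⟩ := foldl_swap_spec up s (s.length / 2) hd2 (s.length / 2) le_rfl
  have hL := stage_fst_length up s
  have hR := stage_snd_length up s
  apply List.ext_getElem (by rw [bitonic_compare_length]; simp [hL, hR]; omega)
  intro i h1 h2
  have hi : i < s.length := by rwa [bitonic_compare_length] at h1
  rw [← List.getD_eq_getElem _ 0 h1, ← List.getD_eq_getElem _ 0 h2]
  show ((List.range (s.length / 2)).foldl (swapStep up (s.length / 2)) s).getD i 0 = _
  rw [hget i]
  by_cases c1 : i < s.length / 2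
  · rw [if_pos c1, List.getD_append _ _ _ i (by rw [hL]; exact c1), stage_fst_getD up s i c1]
  · rw [if_neg c1, List.getD_append_right _ _ _ i (by rw [hL]; omega), hL]
    by_cases c2 : i < s.length / 2 + s.length / 2
    · rw [if_pos ⟨by omega, by omega⟩,
        stage_snd_getD_lo up s (i - s.length / 2) (by omega)]
    · rw [if_neg (by omega),
        stage_snd_getD_hi up s (i - s.length / 2) (by omega) (by omega),
        show s.length / 2 + (i - s.length / 2) = i from by omega]

theorem merge_small (up : Bool) (s : List Int) (h : s.length ≤ 1) :
    bitonic_merge up s = s := by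
  rw [bitonic_merge]
  split_ifs <;> first | rfl | omega

theorem merge_step (up : Bool) (s : List Int) (h : 2 ≤ s.length) :
    bitonic_merge up s = bitonic_merge up (stage up s).1 ++ bitonic_merge up (stage up s).2 := by
  rw [bitonic_merge, if_neg (by omega), if_neg (by omega)]
  have hhalf : ((stage up s).1 ++ (stage up s).2).length / 2 = (stage up s).1.length := by
    simp [stage_fst_length, stage_snd_length]; omega
  rw [compare_eq_stage up s, hhalf, List.take_left, List.drop_left]

theorem mergeLoop_eq (up : Bool) : ∀ (stack : List (List Int)) (out : List Int),
    mergeLoop up stack out = out ++ (stack.map (fun s => bitonic_merge up s)).flatten := by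
  intro stack out
  fun_induction mergeLoop up stack out with
  | case1 out => simp
  | case2 s rest out hs ih =>
    rw [ih]
    simp [merge_small up s hs]
  | case3 s rest out hs ih =>
    rw [ih]
    simp [merge_step up s (by omega : 2 ≤ s.length)]

-- ===== VERDICT (by name: the statement is the Claim_ definition above) =====
theorem bitonic_merge_spec : Claim_equal_bitonic_merge := by
  intro up x _ _
  unfold Spec_bitonic_merge bitonic_merge_alt
  rw [mergeLoop_eq]
  simp
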